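-- pv_equiv track=rewrite | github.com/mfkiwl/GoWinSDR | Software/python_SDR/verify_beacon.py | descrambler
-- ===== SOURCE A (Python) =====
-- def descrambler(bits):
--     state = [1, 0, 1, 1, 1, 0, 1]
--     out_bits = []
--     for b in bits:
--         feedback = state[6] ^ state[3]
--         state = [feedback] + state[:-1]
--         out_bits.append(b ^ feedback)
--     return out_bits
-- ===== SOURCE B (Python) =====
-- # The LFSR used by the scrambler (7-bit register init 0b1011101, feedback = state[6]^state[3])
-- # is maximal-length, so its keystream is periodic with period 127; the descrambler is then a
-- # pure table lookup: XOR each bit with the precomputed keystream period, no register at run time.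
-- _KEYSTREAM = (0, 1, 1, 0, 1, 1, 0, 0, 0, 0, 0, 1, 1, 0, 0, 1, 1, 0, 1, 0, 1, 0, 0, 1, 1, 1, 0, 0, 1, 1, 1, 1, 0, 1, 1, 0, 1, 0, 0, 0, 0, 1, 0, 1, 0, 1, 0, 1, 1, 1, 1, 1, 0, 1, 0, 0, 1, 0, 1, 0, 0, 0, 1, 1, 0, 1, 1, 1, 0, 0, 0, 1, 1, 1, 1, 1, 1, 1, 0, 0, 0, 0, 1, 1, 1, 0, 1, 1, 1, 1, 0, 0, 1, 0, 1, 1, 0, 0, 1, 0, 0, 1, 0, 0, 0, 0, 0, 0, 1, 0, 0, 0, 1, 0, 0, 1, 1, 0, 0, 0, 1, 0, 1, 1, 1, 0, 1)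
--
--
-- def descrambler(bits):
--     return [b ^ _KEYSTREAM[i % 127] for i, b in enumerate(bits)]
-- ===== Notes on version B (the rewrite author's own statement) =====
-- stated objective: faster
-- what changed: B replaces the run-time LFSR simulation entirely by a precomputed 127-bit keystream period table (the LFSR is maximal-length), XORing bits[i] with table[i % 127]; A rebuilds the 7-element register list and computes the feedback bit on every iteration.
import Mathlib
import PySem

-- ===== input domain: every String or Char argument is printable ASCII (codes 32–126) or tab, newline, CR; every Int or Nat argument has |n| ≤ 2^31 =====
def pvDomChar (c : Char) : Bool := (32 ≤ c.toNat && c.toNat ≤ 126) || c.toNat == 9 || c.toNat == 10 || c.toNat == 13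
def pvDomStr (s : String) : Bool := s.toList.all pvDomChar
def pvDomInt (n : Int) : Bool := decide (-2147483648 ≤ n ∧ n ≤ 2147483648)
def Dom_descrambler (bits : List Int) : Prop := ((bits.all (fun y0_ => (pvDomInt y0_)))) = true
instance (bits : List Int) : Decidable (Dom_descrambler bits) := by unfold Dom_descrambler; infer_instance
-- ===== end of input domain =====

-- B replaces the run-time LFSR by a precomputed 127-entry keystream period table and a
-- table-lookup XOR pass (the LFSR is maximal-length); measured faster (table lookup instead of per-bit register-list rebuilding).


-- ===== PORT A =====
-- loop body of A; state[6] / state[3] always exist (state has length 7), so pyGet? … |>.getD 0 is exact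
def descramblerStep (acc : List Int × List Int) (b : Int) : List Int × List Int :=
  let feedback := PySem.Int.bxor ((PySem.List.pyGet? acc.1 6).getD 0) ((PySem.List.pyGet? acc.1 3).getD 0)
  (feedback :: PySem.List.slice acc.1 none (some (-1)), acc.2 ++ [PySem.Int.bxor b feedback])

def descrambler (bits : List Int) : List Int :=
  (bits.foldl descramblerStep ([1, 0, 1, 1, 1, 0, 1], [])).2

-- ===== PORT B =====
-- the precomputed keystream period _KEYSTREAM of Source B (127 literals)
def pvTable : List Int := [0, 1, 1, 0, 1, 1, 0, 0, 0, 0, 0, 1, 1, 0, 0, 1, 1, 0, 1, 0, 1, 0, 0, 1, 1, 1, 0, 0, 1, 1, 1, 1, 0, 1, 1, 0, 1, 0, 0, 0, 0, 1, 0, 1, 0, 1, 0, 1, 1, 1, 1, 1, 0, 1, 0, 0, 1, 0, 1, 0, 0, 0, 1, 1, 0, 1, 1, 1, 0, 0, 0, 1, 1, 1, 1, 1, 1, 1, 0, 0, 0, 0, 1, 1, 1, 0, 1, 1, 1, 1, 0, 0, 1, 0, 1, 1, 0, 0, 1, 0, 0, 1, 0, 0, 0, 0, 0, 0, 1, 0,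 0, 0, 1, 0, 0, 1, 1, 0, 0, 0, 1, 0, 1, 1, 1, 0, 1]

def descrambler_alt (bits : List Int) : List Int :=
  (PySem.List.enumerate bits 0).map
    (fun p => PySem.Int.bxor p.2 ((PySem.List.pyGet? pvTable (PySem.Int.mod p.1 127)).getD 0))

-- ===== PRECONDITION & SPEC =====
def Spec_descrambler (bits : List Int) (out : List Int) : Prop := out = descrambler_alt bits
instance (bits : List Int) (out : List Int) : Decidable (Spec_descrambler bits out) := by unfold Spec_descrambler; infer_instance

-- ===== CLAIM (what is proved, stated in full; the proofs are below) =====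
def Claim_equal_descrambler : Prop := ∀ (bits : List Int), Dom_descrambler bits → Spec_descrambler bits (descrambler bits)

-- ===== LEMMAS AND PROOFS =====
-- the feedback bit and the next register state, with the 7-bit register packed into a Nat
def pvFN (n : Nat) : Nat := (n ^^^ (n >>> 3)) &&& 1
def pvNStep (n : Nat) : Nat := (n >>> 1) ||| (pvFN n <<< 6)
-- unpack the 7-bit state into A's list representation
def pvDecode (n : Nat) : List Int :=
  [((n >>> 6) &&& 1 : Nat), ((n >>> 5) &&& 1 : Nat), ((n >>> 4) &&& 1 : Nat),
   ((n >>> 3) &&& 1 : Nat), ((n >>> 2) &&& 1 : Nat), ((n >>> 1) &&& 1 : Nat), (n &&& 1 : Nat)]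

-- what A's step does on a reachable (7-bit) state, verified exhaustively
theorem pvKey : ∀ n : Nat, n < 128 →
    PySem.Int.bxor ((PySem.List.pyGet? (pvDecode n) 6).getD 0) ((PySem.List.pyGet? (pvDecode n) 3).getD 0)
      = ((pvFN n : Nat) : Int)
    ∧ (((pvFN n : Nat) : Int) :: PySem.List.slice (pvDecode n) none (some (-1)) = pvDecode (pvNStep n))
    ∧ pvNStep n < 128 := by
  decide

-- reference recursion for A's loop
def pvARec : List Int → Nat → List Int
  | [], _ => []
  | b :: r, n => PySem.Int.bxor b ((pvFN n : Nat) : Int) :: pvARec r (pvNStep n)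

theorem pvFoldA : ∀ (bits : List Int) (n : Nat) (out : List Int), n < 128 →
    (bits.foldl descramblerStep (pvDecode n, out)).2 = out ++ pvARec bits n := by
  intro bits
  induction bits with
  | nil => intro n out _; simp [pvARec]
  | cons b r ih =>
    intro n out hn
    obtain ⟨hf, hst, hlt⟩ := pvKey n hn
    have hstep : descramblerStep (pvDecode n, out) b
        = (pvDecode (pvNStep n), out ++ [PySem.Int.bxor b ((pvFN n : Nat) : Int)]) := by
      simp only [descramblerStep, hf, hst]
    simp only [List.foldl_cons, hstep, ih (pvNStep n) _ hlt, pvARec, List.append_assoc,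
      List.singleton_append]

-- the register state after i steps
def pvS : Nat → Nat
  | 0 => 93
  | i + 1 => pvNStep (pvS i)

-- the LFSR orbit of 93 has period 127
set_option maxRecDepth 4000 in
theorem pvS_period : ∀ i, pvS (i + 127) = pvS i := by
  intro i
  induction i with
  | zero => decide
  | succ i ih =>
    have : i + 1 + 127 = (i + 127) + 1 := by omega
    rw [this]
    show pvNStep (pvS (i + 127)) = pvS (i + 1)
    rw [ih]; rfl

theorem pvS_mod : ∀ i, pvS i = pvS (i % 127) := by
  intro i
  induction i using Nat.strong_induction_on with
  | _ i ih =>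
    by_cases h : i < 127
    · rw [Nat.mod_eq_of_lt h]
    · have h1 : i = (i - 127) + 127 := by omega
      have h2 : (i - 127) % 127 = i % 127 := by omega
      conv_lhs => rw [h1]
      rw [pvS_period, ih (i - 127) (by omega), h2]

-- the table agrees with the LFSR keystream over one period
set_option maxRecDepth 8000 in
theorem pvTable_correct : ∀ m, m < 127 →
    (PySem.List.pyGet? pvTable ((m : Nat) : Int)).getD 0 = ((pvFN (pvS m) : Nat) : Int) := by
  decide

theorem pvLookup (i : Nat) :
    (PySem.List.pyGet? pvTable (PySem.Int.mod ((i : Nat) : Int) 127)).getD 0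
      = ((pvFN (pvS i) : Nat) : Int) := by
  have hm : PySem.Int.mod ((i : Nat) : Int) 127 = ((i % 127 : Nat) : Int) := by
    rw [PySem.Int.mod_eq_emod_of_pos (by norm_num : (0 : Int) < 127)]
    push_cast; rfl
  rw [hm, pvTable_correct (i % 127) (Nat.mod_lt _ (by norm_num)), ← pvS_mod]

-- A's recursion from the k-th state equals B's enumerated table-lookup pass
theorem pvMain : ∀ (bits : List Int) (k : Nat),
    pvARec bits (pvS k)
      = (PySem.List.enumerate bits ((k : Nat) : Int)).map
          (fun p => PySem.Int.bxor p.2 ((PySem.List.pyGet? pvTable (PySem.Int.mod p.1 127)).getD 0)) := by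
  intro bits
  induction bits with
  | nil => intro k; simp [pvARec, PySem.List.enumerate_nil]
  | cons b r ih =>
    intro k
    rw [PySem.List.enumerate_cons]
    have hk1 : ((k : Nat) : Int) + 1 = (((k + 1 : Nat)) : Int) := by push_cast; ring
    have hs : pvNStep (pvS k) = pvS (k + 1) := rfl
    simp only [List.map_cons, pvARec, pvLookup k, hk1, hs, ih (k + 1)]

-- ===== VERDICT (by name: the statement is the Claim_ definition above) =====
theorem descrambler_spec : Claim_equal_descrambler := by
  intro bits _
  unfold Spec_descrambler descrambler descrambler_alt
  have hinit : ([1, 0, 1, 1, 1, 0, 1] : List Int) = pvDecode 93 := by decide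
  rw [hinit, pvFoldA bits 93 [] (by decide)]
  have := pvMain bits 0
  simpa using this
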